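-- pv_equiv track=rewrite | github.com/gregorriegler/simple-agent | modernizer/system_prompt_generator.py | _extract_example_from_usage_info
-- ===== SOURCE A (Python) =====
-- def _extract_example_from_usage_info(usage_info):
--     """Extract example from usage info if available"""
--     # Look for common example patterns in the usage info
--     lines = usage_info.split('\n')
--     for i, line in enumerate(lines):
--         if 'example' in line.lower() or 'e.g.' in line.lower():
--             # Return the next non-empty line as example
--             for j in range(i + 1, len(lines)):
--                 if lines[j].strip():
--                     return lines[j].strip()
--     return None
-- ===== SOURCE B (Python) =====
-- def _extract_example_from_usage_info(usage_info):
--     """Extract example from usage info if available"""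
--     found = False
--     for line in usage_info.split('\n'):
--         stripped = line.strip()
--         if found and stripped:
--             return stripped
--         low = line.lower()
--         if 'example' in low or 'e.g.' in low:
--             found = True
--     return None
-- ===== Notes on version B (the rewrite author's own statement) =====
-- stated objective: simpler
-- what changed: Replaced the nested index scan (for each keyword line, re-scan forward for the next non-empty line) by a single linear pass with a boolean flag that returns the first non-empty stripped line after a keyword line.
import Mathlib
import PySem

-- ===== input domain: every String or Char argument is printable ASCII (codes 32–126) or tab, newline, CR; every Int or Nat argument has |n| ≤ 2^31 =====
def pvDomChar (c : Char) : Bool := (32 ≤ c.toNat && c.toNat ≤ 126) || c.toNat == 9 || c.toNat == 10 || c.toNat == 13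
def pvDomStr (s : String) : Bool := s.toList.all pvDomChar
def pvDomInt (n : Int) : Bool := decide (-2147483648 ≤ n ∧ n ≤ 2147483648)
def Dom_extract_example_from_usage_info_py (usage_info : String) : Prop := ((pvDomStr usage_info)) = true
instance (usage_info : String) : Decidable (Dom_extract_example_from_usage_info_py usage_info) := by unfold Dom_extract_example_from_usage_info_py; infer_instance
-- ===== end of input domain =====

-- B replaces A's nested index scan by one linear pass with a boolean flag (simpler, O(n)).

-- 'example' in line.lower() or 'e.g.' in line.lower()  (shared keyword test of both Pythons)
def pvKw (line : String) : Bool :=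
  PySem.Str.isIn "example" (PySem.Str.lower line) || PySem.Str.isIn "e.g." (PySem.Str.lower line)

-- ===== PORT A =====
-- inner loop: for j in range(i+1, len(lines)): if lines[j].strip(): return lines[j].strip()
def pvA_inner (lines : List String) (js : List Int) : Option String :=
  match js with
  | [] => none
  | j :: rest =>
    match PySem.List.pyGet? lines j with
    | some l => if PySem.Str.strip l ≠ "" then some (PySem.Str.strip l) else pvA_inner lines rest
    | none => pvA_inner lines rest   -- unreachable: j produced by range(i+1, len(lines))

-- outer loop: for i, line in enumerate(lines): …
def pvA_outer (lines : List String) (en : List (Int × String)) : Option String :=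
  match en with
  | [] => none
  | (i, line) :: rest =>
    if pvKw line then
      match pvA_inner lines (PySem.List.pyRange (i + 1) lines.length 1) with
      | some r => some r
      | none => pvA_outer lines rest
    else pvA_outer lines rest

def extract_example_from_usage_info_py (usage_info : String) : Option String :=
  let lines := (PySem.Str.split? usage_info "\n").getD []
  pvA_outer lines (PySem.List.enumerate lines 0)

-- ===== PORT B =====
-- single pass with a 'found' flag (Source B)
def pvB_loop (ls : List String) (found : Bool) : Option String :=
  match ls with
  | [] => none
  | line :: rest =>
    let stripped := PySem.Str.strip line
    if found = true ∧ stripped ≠ "" then some stripped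
    else pvB_loop rest (found || pvKw line)

def extract_example_from_usage_info_py_alt (usage_info : String) : Option String :=
  pvB_loop ((PySem.Str.split? usage_info "\n").getD []) false

-- ===== PRECONDITION & SPEC =====
def Spec_extract_example_from_usage_info_py (usage_info : String) (out : Option String) : Prop := out = extract_example_from_usage_info_py_alt usage_info
instance (usage_info : String) (out : Option String) : Decidable (Spec_extract_example_from_usage_info_py usage_info out) := by unfold Spec_extract_example_from_usage_info_py; infer_instance

-- ===== CLAIM (what is proved, stated in full; the proofs are below) =====
def Claim_equal_extract_example_from_usage_info_py : Prop := ∀ (usage_info : String), Dom_extract_example_from_usage_info_py usage_info → Spec_extract_example_from_usage_info_py usage_info (extract_example_from_usage_info_py usage_info)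

-- ===== LEMMAS AND PROOFS =====

-- the first non-empty stripped line of a list (the value both inner searches produce)
def pvFNE (ls : List String) : Option String :=
  match ls with
  | [] => none
  | l :: rest => if PySem.Str.strip l ≠ "" then some (PySem.Str.strip l) else pvFNE rest

theorem pvA_inner_eq (lines : List String) (k : Nat) :
    pvA_inner lines (PySem.List.pyRange (k : Int) lines.length 1) = pvFNE (lines.drop k) := by
  by_cases h : k < lines.length
  · rw [PySem.List.pyRange_one_cons (by exact_mod_cast h)]
    have hg : PySem.List.pyGet? lines (k : Int) = some lines[k] := by
      simp [PySem.List.pyGet?_natCast, List.getElem?_eq_getElem h]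
    have hd : lines.drop k = lines[k] :: lines.drop (k + 1) := List.drop_eq_getElem_cons h
    have hrec : ((k : Int) + 1) = ((k + 1 : Nat) : Int) := by push_cast; ring
    rw [pvA_inner, hg, hd, hrec, pvA_inner_eq lines (k + 1)]
    rfl
  · rw [PySem.List.pyRange_one_eq_nil (by exact_mod_cast Nat.le_of_not_lt h),
      List.drop_eq_nil_of_le (Nat.le_of_not_lt h)]
    rfl

theorem pvB_loop_true (ls : List String) : pvB_loop ls true = pvFNE ls := by
  induction ls with
  | nil => rfl
  | cons l rest ih =>
    rw [pvB_loop, pvFNE]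
    by_cases h : PySem.Str.strip l ≠ ""
    · simp [h]
    · simp [h, ih]

theorem pvFNE_none_iff (ls : List String) :
    pvFNE ls = none ↔ ∀ l ∈ ls, PySem.Str.strip l = "" := by
  induction ls with
  | nil => simp [pvFNE]
  | cons l rest ih =>
    rw [pvFNE]
    by_cases h : PySem.Str.strip l ≠ ""
    · simp [h]
    · push Not at h
      simp [h, ih]

theorem pvA_outer_none (lines : List String) (k : Nat)
    (hnone : ∀ l ∈ lines.drop k, PySem.Str.strip l = "") :
    ∀ (ls' : List String) (j : Nat), k ≤ j →
      pvA_outer lines (PySem.List.enumerate ls' (j : Int)) = none := by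
  intro ls'
  induction ls' with
  | nil => intro j _; rfl
  | cons l rest ih =>
    intro j hj
    rw [PySem.List.enumerate_cons, pvA_outer]
    have hrec : ((j : Int) + 1) = ((j + 1 : Nat) : Int) := by push_cast; ring
    have hinner : pvA_inner lines (PySem.List.pyRange ((j : Int) + 1) lines.length 1) = none := by
      rw [hrec, pvA_inner_eq, pvFNE_none_iff]
      intro l hl
      apply hnone
      have : lines.drop (j + 1) = (lines.drop k).drop (j + 1 - k) := by
        rw [List.drop_drop]
        congr 1
        omega
      rw [this] at hl
      exact List.mem_of_mem_drop hl
    have htail := ih (j + 1) (by omega)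
    rw [hinner, hrec]
    cases hkw : pvKw l <;> simpa using htail

theorem pv_main (lines : List String) :
    ∀ (ls' : List String) (k : Nat), ls' = lines.drop k →
      pvA_outer lines (PySem.List.enumerate ls' (k : Int)) = pvB_loop ls' false := by
  intro ls'
  induction ls' with
  | nil => intro k _; rfl
  | cons l rest ih =>
    intro k hk
    have hrest : rest = lines.drop (k + 1) := by
      have h2 := congrArg List.tail hk
      simpa [List.tail_drop] using h2
    rw [PySem.List.enumerate_cons, pvA_outer, pvB_loop]
    have hrec : ((k : Int) + 1) = ((k + 1 : Nat) : Int) := by push_cast; ring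
    simp only [Bool.false_eq_true, false_and, if_false, Bool.false_or]
    by_cases hkw : pvKw l = true
    · rw [if_pos hkw, hrec, pvA_inner_eq, ← hrest, hkw, pvB_loop_true]
      cases hfne : pvFNE rest with
      | some r => rfl
      | none =>
        rw [pvA_outer_none lines (k + 1) (by rw [← hrest, ← pvFNE_none_iff]; exact hfne)
          rest (k + 1) (le_refl _)]
    · rw [if_neg hkw, Bool.not_eq_true] at *
      rw [hkw]
      exact ih (k + 1) hrest

-- ===== VERDICT (by name: the statement is the Claim_ definition above) =====
theorem extract_example_from_usage_info_py_spec : Claim_equal_extract_example_from_usage_info_py := by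
  intro u _
  unfold Spec_extract_example_from_usage_info_py extract_example_from_usage_info_py
    extract_example_from_usage_info_py_alt
  have := pv_main ((PySem.Str.split? u "\n").getD []) ((PySem.Str.split? u "\n").getD []) 0 rfl
  simpa using this
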